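-- pv_equiv track=rewrite | github.com/Zjlong-1/2024fall-cs101 | Previous practices/431C-k-树.py | solve
-- ===== SOURCE A (Python) =====
-- def solve(n,k,d):
--     l1 = [0] * (n + 1)
--     l2 = [0] * (n + 1)
--     l1[0] = 1
--     for i in range(1, n + 1):
--         for j in range(1, min(i, k) + 1):
--             l1[i] += l1[i - j]
--     if d>n:
--         return 0
--     l2[d]=1
--     for i in range(d + 1, n + 1):
--         for j in range(1, d):
--             l2[i] += l2[i - j]
--         for j in range(d, min(i, k) + 1):
--             l2[i] += l1[i - j]
--     return l2[-1]%(10**9+7)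
-- ===== SOURCE B (Python) =====
-- MOD = 10 ** 9 + 7
--
-- def solve(n, k, d):
--     # One pass with prefix sums: pf[i] = sum of l1[0..i], pg[i] = sum of l2[d..i],
--     # so each window sum is a difference of two prefix values (O(n) instead of O(n*k)).
--     if d > n:
--         return 0
--     pf = [0] * (n + 1)
--     pf[0] = 1
--     for i in range(1, n + 1):
--         m = k if k < i else i
--         if m < 0:
--             m = 0
--         lo = i - m - 1
--         fi = pf[i - 1] - (pf[lo] if lo >= 0 else 0)
--         pf[i] = pf[i - 1] + fi
--     pg = [0] * (n + 1)
--     pg[d] = 1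
--     for i in range(d + 1, n + 1):
--         gi = pg[i - 1] - pg[i - d]
--         m = k if k < i else i
--         if m >= d:
--             lo = i - m - 1
--             gi += pf[i - d] - (pf[lo] if lo >= 0 else 0)
--         pg[i] = pg[i - 1] + gi
--     gn = pg[n] - (pg[n - 1] if n >= 1 else 0)
--     return gn % MOD
-- ===== Notes on version B (the rewrite author's own statement) =====
-- stated objective: faster
-- what changed: Replaces both O(k)-wide inner window-sum loops with running prefix-sum arrays (pf over l1, pg over l2), so each dp value is computed from two prefix differences in O(1) and the whole count is one O(n) pass.
-- outside the precondition, e.g. on solve(2, 2, 0): A returns 4, B returns 8; on solve(2, -5, -1): A returns 1, B raises IndexError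
import Mathlib
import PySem

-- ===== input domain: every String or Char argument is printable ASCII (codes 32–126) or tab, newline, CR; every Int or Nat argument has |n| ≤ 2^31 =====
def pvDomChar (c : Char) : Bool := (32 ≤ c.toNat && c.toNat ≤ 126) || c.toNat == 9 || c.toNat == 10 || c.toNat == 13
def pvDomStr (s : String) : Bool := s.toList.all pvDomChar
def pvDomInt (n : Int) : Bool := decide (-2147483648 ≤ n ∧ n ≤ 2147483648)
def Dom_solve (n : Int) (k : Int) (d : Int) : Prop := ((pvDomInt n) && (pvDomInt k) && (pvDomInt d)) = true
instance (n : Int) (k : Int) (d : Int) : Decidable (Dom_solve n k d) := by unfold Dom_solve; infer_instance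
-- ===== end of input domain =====

-- B replaces A's O(k)-wide inner window-sum loops by running prefix-sum arrays, one O(1) step per i (objective: faster).
-- Python lists are ported as List Int with PySem.List.pyGetD/pySetD reads and writes (exact for the in-range
-- indices used inside Pre_); A's `l2[-1]` is PySem.List.pyGetD l2 (-1) 0 [the last cell], exactly as in Python.

-- ===== PORT A =====
-- l1 = [0]*(n+1); l1[0] = 1; first double loop
def aL1List (n : Int) (k : Int) : List Int :=
  (PySem.List.pyRange 1 (n + 1) 1).foldl
    (fun l1 i =>
      (PySem.List.pyRange 1 (min i k + 1) 1).foldl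
        (fun l1 j =>
          PySem.List.pySetD l1 i (PySem.List.pyGetD l1 i 0 + PySem.List.pyGetD l1 (i - j) 0))
        l1)
    (PySem.List.pySetD (List.replicate (n + 1).toNat 0) 0 1)

-- l2 = [0]*(n+1); l2[d] = 1; second double loop, reading the finished l1
def aL2List (n : Int) (k : Int) (d : Int) (l1 : List Int) : List Int :=
  (PySem.List.pyRange (d + 1) (n + 1) 1).foldl
    (fun l2 i =>
      let l2a := (PySem.List.pyRange 1 d 1).foldl
        (fun l2 j =>
          PySem.List.pySetD l2 i (PySem.List.pyGetD l2 i 0 + PySem.List.pyGetD l2 (i - j) 0))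
        l2
      (PySem.List.pyRange d (min i k + 1) 1).foldl
        (fun l2 j =>
          PySem.List.pySetD l2 i (PySem.List.pyGetD l2 i 0 + PySem.List.pyGetD l1 (i - j) 0))
        l2a)
    (PySem.List.pySetD (List.replicate (n + 1).toNat 0) d 1)

def solve (n : Int) (k : Int) (d : Int) : Int :=
  let l1 := aL1List n k
  if d > n then 0
  else PySem.Int.mod (PySem.List.pyGetD (aL2List n k d l1) (-1) 0) (10 ^ 9 + 7)

-- ===== PORT B =====
-- pf[i] = running prefix sums of the weight-1..k dp (Source B's first loop)
def bPfList (n : Int) (k : Int) : List Int :=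
  (PySem.List.pyRange 1 (n + 1) 1).foldl
    (fun pf i =>
      let m0 := if k < i then k else i
      let m := if m0 < 0 then 0 else m0
      let lo := i - m - 1
      let fi := PySem.List.pyGetD pf (i - 1) 0 - (if 0 ≤ lo then PySem.List.pyGetD pf lo 0 else 0)
      PySem.List.pySetD pf i (PySem.List.pyGetD pf (i - 1) 0 + fi))
    (PySem.List.pySetD (List.replicate (n + 1).toNat 0) 0 1)

-- pg[i] = running prefix sums (from d) of the max-edge-≥-d dp (Source B's second loop)
def bPgList (n : Int) (k : Int) (d : Int) (pf : List Int) : List Int :=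
  (PySem.List.pyRange (d + 1) (n + 1) 1).foldl
    (fun pg i =>
      let gi0 := PySem.List.pyGetD pg (i - 1) 0 - PySem.List.pyGetD pg (i - d) 0
      let m := if k < i then k else i
      let gi := if d ≤ m then
          gi0 + (PySem.List.pyGetD pf (i - d) 0 -
            (if 0 ≤ i - m - 1 then PySem.List.pyGetD pf (i - m - 1) 0 else 0))
        else gi0
      PySem.List.pySetD pg i (PySem.List.pyGetD pg (i - 1) 0 + gi))
    (PySem.List.pySetD (List.replicate (n + 1).toNat 0) d 1)

def solve_alt (n : Int) (k : Int) (d : Int) : Int :=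
  if d > n then 0
  else
    let pf := bPfList n k
    let pg := bPgList n k d pf
    let gn := PySem.List.pyGetD pg n 0 - (if 1 ≤ n then PySem.List.pyGetD pg (n - 1) 0 else 0)
    PySem.Int.mod gn (10 ^ 9 + 7)

-- ===== PRECONDITION & SPEC =====
-- Pre_ restricts to the problem's natural domain (n ≥ 0, d ≥ 1): A raises IndexError for n < 0,
-- and d ≤ 0 is outside the k-tree problem (edge weights are ≥ 1), where A's j = 0 / negative-index
-- list accesses are accidental.
def Pre_solve (n : Int) (k : Int) (d : Int) : Prop := 0 ≤ n ∧ 1 ≤ d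
instance (n : Int) (k : Int) (d : Int) : Decidable (Pre_solve n k d) := by unfold Pre_solve; infer_instance
def pvWitness_solve : Int × Int × Int := (5, 3, 2)

def Spec_solve (n : Int) (k : Int) (d : Int) (out : Int) : Prop := out = solve_alt n k d
instance (n : Int) (k : Int) (d : Int) (out : Int) : Decidable (Spec_solve n k d out) := by unfold Spec_solve; infer_instance

-- ===== CLAIM (what is proved, stated in full; the proofs are below) =====
def Claim_equal_solve : Prop := ∀ (n : Int) (k : Int) (d : Int), Dom_solve n k d → Pre_solve n k d → Spec_solve n k d (solve n k d)

-- ===== LEMMAS AND PROOFS =====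

-- proof-side functional views of the four arrays (index ↦ cell value, 0 elsewhere)
def aL1 (k : Int) (hi : Int) : Int → Int :=
  (PySem.List.pyRange 1 (hi + 1) 1).foldl
    (fun F i =>
      (PySem.List.pyRange 1 (min i k + 1) 1).foldl
        (fun G j => fun x => if x = i then G i + G (i - j) else G x) F)
    (fun x => if x = 0 then 1 else 0)

def aL2 (k : Int) (d : Int) (hi : Int) (f : Int → Int) : Int → Int :=
  (PySem.List.pyRange (d + 1) (hi + 1) 1).foldl
    (fun F i =>
      let F1 := (PySem.List.pyRange 1 d 1).foldl
        (fun G j => fun x => if x = i then G i + G (i - j) else G x) F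
      (PySem.List.pyRange d (min i k + 1) 1).foldl
        (fun G j => fun x => if x = i then G i + f (i - j) else G x) F1)
    (fun x => if x = d then 1 else 0)

def bPf (k : Int) (hi : Int) : Int → Int :=
  (PySem.List.pyRange 1 (hi + 1) 1).foldl
    (fun P i =>
      let m0 := if k < i then k else i
      let m := if m0 < 0 then 0 else m0
      let lo := i - m - 1
      let fi := P (i - 1) - (if 0 ≤ lo then P lo else 0)
      fun x => if x = i then P (i - 1) + fi else P x)
    (fun x => if x = 0 then 1 else 0)

def bPg (k : Int) (d : Int) (hi : Int) (pf : Int → Int) : Int → Int :=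
  (PySem.List.pyRange (d + 1) (hi + 1) 1).foldl
    (fun P i =>
      let gi0 := P (i - 1) - P (i - d)
      let m := if k < i then k else i
      let gi := if d ≤ m then
          gi0 + (pf (i - d) - (if 0 ≤ i - m - 1 then pf (i - m - 1) else 0))
        else gi0
      fun x => if x = i then P (i - 1) + gi else P x)
    (fun x => if x = d then 1 else 0)

-- list state l represents functional state F on indices 0..n
def LRep (n : Int) (l : List Int) (F : Int → Int) : Prop :=
  l.length = (n + 1).toNat ∧ ∀ x : Int, 0 ≤ x → x ≤ n → PySem.List.pyGetD l x 0 = F x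

-- inner loop reading the evolving array at indices ≠ i
theorem innerFoldSelf (i : Int) (js : List Int) (F : Int → Int) (h : ∀ j ∈ js, j ≠ 0) :
    js.foldl (fun G j => fun x => if x = i then G i + G (i - j) else G x) F
      = fun x => if x = i then F i + (js.map (fun j => F (i - j))).sum else F x := by
  induction js generalizing F with
  | nil => funext x; by_cases hx : x = i <;> simp [hx]
  | cons j js ih =>
    have hj : j ≠ 0 := h j (by simp)
    have h' : ∀ j' ∈ js, j' ≠ 0 := fun j' hj' => h j' (by simp [hj'])
    simp only [List.foldl_cons]
    rw [ih _ h']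
    funext x
    by_cases hx : x = i
    · have hmap : (List.map (fun j' => if i - j' = i then F i + F (i - j) else F (i - j')) js)
          = List.map (fun j' => F (i - j')) js := by
        apply List.map_congr_left
        intro a ha
        have hne : i - a ≠ i := by have := h' a ha; omega
        simp [hne]
      simp only [hx, List.map_cons, List.sum_cons, if_true]
      rw [hmap]
      ring
    · simp [hx]

-- inner loop reading a fixed array f
theorem innerFoldFix (i : Int) (f : Int → Int) (js : List Int) (F : Int → Int) :
    js.foldl (fun G j => fun x => if x = i then G i + f (i - j) else G x) F
      = fun x => if x = i then F i + (js.map (fun j => f (i - j))).sum else F x := by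
  induction js generalizing F with
  | nil => funext x; by_cases hx : x = i <;> simp [hx]
  | cons j js ih =>
    simp only [List.foldl_cons]
    rw [ih]
    funext x
    by_cases hx : x = i
    · simp only [hx, List.map_cons, List.sum_cons, if_true]
      ring
    · simp [hx]

theorem sum_map_pyRange_aux (g : Int → Int) (b : Int) : ∀ (T : ℕ) (a : Int), (b - a).toNat = T →
    ((PySem.List.pyRange a b 1).map g).sum = ∑ t ∈ Finset.Icc a (b - 1), g t := by
  intro T
  induction T with
  | zero =>
    intro a hT
    have hab : b ≤ a := by omega
    rw [PySem.List.pyRange_one_eq_nil hab]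
    have he : Finset.Icc a (b - 1) = ∅ := Finset.Icc_eq_empty (by omega)
    simp [he]
  | succ T ih =>
    intro a hT
    have hab : a < b := by omega
    rw [PySem.List.pyRange_one_cons hab, List.map_cons, List.sum_cons, ih (a + 1) (by omega)]
    have hins : Finset.Icc a (b - 1) = insert a (Finset.Icc (a + 1) (b - 1)) := by
      ext t
      simp only [Finset.mem_Icc, Finset.mem_insert]
      omega
    have hnot : a ∉ Finset.Icc (a + 1) (b - 1) := by
      simp only [Finset.mem_Icc]
      omega
    rw [hins, Finset.sum_insert hnot]

theorem sum_map_pyRange (g : Int → Int) (a b : Int) :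
    ((PySem.List.pyRange a b 1).map g).sum = ∑ t ∈ Finset.Icc a (b - 1), g t :=
  sum_map_pyRange_aux g b (b - a).toNat a rfl

theorem sum_reflect (A : Int → Int) (c a b : Int) :
    ∑ j ∈ Finset.Icc a b, A (c - j) = ∑ t ∈ Finset.Icc (c - b) (c - a), A t := by
  refine Finset.sum_nbij' (fun j => c - j) (fun t => c - t) ?_ ?_ ?_ ?_ ?_ <;>
    (intro x hx; simp only [Finset.mem_Icc] at *) <;>
    first
      | omega
      | (congr 1; omega)

theorem psum_diff (A : Int → Int) (dd a b : Int) (h1 : dd - 1 ≤ a) (h2 : a ≤ b) :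
    (∑ t ∈ Finset.Icc dd b, A t) - (∑ t ∈ Finset.Icc dd a, A t) = ∑ t ∈ Finset.Icc (a + 1) b, A t := by
  have hsub : Finset.Icc dd a ⊆ Finset.Icc dd b := by
    intro x hx; simp only [Finset.mem_Icc] at *; omega
  have hsd : Finset.Icc dd b \ Finset.Icc dd a = Finset.Icc (a + 1) b := by
    ext x; simp only [Finset.mem_Icc, Finset.mem_sdiff]; omega
  rw [← hsd, Finset.sum_sdiff_eq_sub hsub]

theorem sum_ext_low (A : Int → Int) (dd a b : Int) (ha : a ≤ dd) (h : ∀ s, s < dd → A s = 0) :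
    ∑ t ∈ Finset.Icc a b, A t = ∑ t ∈ Finset.Icc dd b, A t := by
  refine (Finset.sum_subset ?_ ?_).symm
  · intro x hx; simp only [Finset.mem_Icc] at *; omega
  · intro x hx hnx
    simp only [Finset.mem_Icc] at *
    exact h x (by omega)

theorem aL1_zero (k : Int) : aL1 k 0 = fun x => if x = 0 then 1 else 0 := by
  unfold aL1
  rw [PySem.List.pyRange_one_eq_nil (by omega)]
  rfl

theorem aL1_step (k : Int) (m : Int) (hm : 0 ≤ m) :
    aL1 k (m + 1) = fun x => if x = m + 1
      then aL1 k m (m + 1) + ∑ j ∈ Finset.Icc 1 (min (m + 1) k), aL1 k m (m + 1 - j)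
      else aL1 k m x := by
  unfold aL1
  rw [show m + 1 + 1 = (m + 1) + 1 from rfl,
      PySem.List.pyRange_one_succ_right (by omega : (1:Int) ≤ m + 1),
      List.foldl_append]
  simp only [List.foldl_cons, List.foldl_nil]
  rw [innerFoldSelf (m + 1) _ _ (by
    intro j hj
    rw [PySem.List.mem_pyRange_one] at hj
    omega)]
  funext x
  by_cases hx : x = m + 1
  · simp only [hx, if_true, sum_map_pyRange]
    norm_num
  · simp [hx]

theorem aL1_vanish (k : Int) (m : ℕ) : ∀ x : Int, (x < 0 ∨ (m : Int) < x) → aL1 k (m : Int) x = 0 := by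
  induction m with
  | zero =>
    intro x hx
    have hx0 : x ≠ 0 := by omega
    rw [show ((0 : ℕ) : Int) = 0 from rfl, aL1_zero]
    simp [hx0]
  | succ m ih =>
    intro x hx
    have hc : ((m + 1 : ℕ) : Int) = (m : Int) + 1 := by push_cast; ring
    rw [hc] at hx ⊢
    rw [aL1_step k m (by positivity)]
    have hne : x ≠ (m : Int) + 1 := by omega
    simp only [hne, if_false]
    exact ih x (by omega)

theorem bPf_zero (k : Int) : bPf k 0 = fun x => if x = 0 then 1 else 0 := by
  unfold bPf
  rw [PySem.List.pyRange_one_eq_nil (by omega)]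
  rfl

theorem bPf_step (k m : Int) (hm : 0 ≤ m) :
    bPf k (m + 1) = fun x =>
      if x = m + 1 then
        bPf k m (m + 1 - 1) +
          (bPf k m (m + 1 - 1) -
            (if 0 ≤ m + 1 - (if (if k < m + 1 then k else m + 1) < 0 then 0
                             else if k < m + 1 then k else m + 1) - 1
             then bPf k m (m + 1 - (if (if k < m + 1 then k else m + 1) < 0 then 0
                                    else if k < m + 1 then k else m + 1) - 1)
             else 0))
      else bPf k m x := by
  unfold bPf
  rw [show m + 1 + 1 = (m + 1) + 1 from rfl,
      PySem.List.pyRange_one_succ_right (by omega : (1 : Int) ≤ m + 1),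
      List.foldl_append]
  rfl

theorem bPf_eq (k : Int) (m : ℕ) : ∀ x : Int,
    bPf k (m : Int) x = if 0 ≤ x ∧ x ≤ (m : Int) then ∑ t ∈ Finset.Icc 0 x, aL1 k (m : Int) t else 0 := by
  induction m with
  | zero =>
    intro x
    rw [show ((0 : ℕ) : Int) = 0 from rfl, bPf_zero, aL1_zero]
    by_cases hx : x = 0
    · simp [hx]
    · have : ¬ (0 ≤ x ∧ x ≤ (0 : Int)) := by omega
      simp [hx, this]
  | succ m ih =>
    intro x
    have hc : ((m + 1 : ℕ) : Int) = (m : Int) + 1 := by push_cast; ring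
    rw [hc]
    rw [bPf_step k (m : Int) (by positivity)]
    set M : Int := (m : Int) with hM
    have hM0 : 0 ≤ M := by positivity
    by_cases hx : x = M + 1
    · subst hx
      simp only [eq_self_iff_true, if_true]
      rw [if_pos (by omega : (0 : Int) ≤ M + 1 ∧ M + 1 ≤ M + 1)]
      have hmin : (if k < M + 1 then k else M + 1) = min (M + 1) k := by
        rcases le_or_gt k (M + 1) with h | h
        · simp [min_def]; omega
        · simp [min_def]; omega
      have hclamp : (if (if k < M + 1 then k else M + 1) < 0 then 0
          else if k < M + 1 then k else M + 1) = max 0 (min (M + 1) k) := by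
        rw [hmin]; split_ifs <;> omega
      rw [hclamp, show M + 1 - 1 = M by ring]
      set w : Int := min (M + 1) k with hw
      have hwle : w ≤ M + 1 := by omega
      have htop : (∑ t ∈ Finset.Icc 0 (M + 1), aL1 k (M + 1) t)
          = (∑ t ∈ Finset.Icc 0 M, aL1 k (M + 1) t) + aL1 k (M + 1) (M + 1) := by
        have hps := psum_diff (aL1 k (M + 1)) 0 M (M + 1) (by omega) (by omega)
        rw [Finset.Icc_self, Finset.sum_singleton] at hps
        omega
      have hlow : (∑ t ∈ Finset.Icc 0 M, aL1 k (M + 1) t) = ∑ t ∈ Finset.Icc 0 M, aL1 k M t := by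
        apply Finset.sum_congr rfl
        intro t ht
        rw [Finset.mem_Icc] at ht
        rw [aL1_step k M hM0]
        have : t ≠ M + 1 := by omega
        simp [this]
      have hnew : aL1 k (M + 1) (M + 1)
          = ∑ t ∈ Finset.Icc (M + 1 - w) M, aL1 k M t := by
        rw [aL1_step k M hM0]
        simp only [eq_self_iff_true, if_true]
        rw [aL1_vanish k m (M + 1) (by omega)]
        rw [sum_reflect (aL1 k M) (M + 1) 1 w]
        rw [show M + 1 - 1 = M by ring]
        ring
      rw [htop, hlow, hnew]
      have hPM : bPf k M M = ∑ t ∈ Finset.Icc 0 M, aL1 k M t := by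
        rw [ih M, if_pos (by omega : (0 : Int) ≤ M ∧ M ≤ M)]
      by_cases hw0 : w ≤ 0
      · rw [show max 0 w = 0 by omega]
        rw [if_pos (by omega : (0 : Int) ≤ M + 1 - 0 - 1)]
        rw [show M + 1 - 0 - 1 = M by ring, hPM]
        have hemp : Finset.Icc (M + 1 - w) M = ∅ := Finset.Icc_eq_empty (by omega)
        rw [hemp, Finset.sum_empty]
        ring
      · push_neg at hw0
        rw [show max 0 w = w by omega]
        by_cases hlo : (0 : Int) ≤ M + 1 - w - 1
        · rw [if_pos hlo]
          have h1 : bPf k M (M + 1 - w - 1) = ∑ t ∈ Finset.Icc 0 (M + 1 - w - 1), aL1 k M t := by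
            rw [ih, if_pos (by omega : (0 : Int) ≤ M + 1 - w - 1 ∧ M + 1 - w - 1 ≤ M)]
          rw [hPM, h1]
          have hps := psum_diff (aL1 k M) 0 (M + 1 - w - 1) M (by omega) (by omega)
          rw [show M + 1 - w - 1 + 1 = M + 1 - w by ring] at hps
          omega
        · rw [if_neg hlo]
          have hwM : w = M + 1 := by omega
          rw [hPM, hwM, show M + 1 - (M + 1) = 0 by ring]
          ring
    · simp only [hx, if_false]
      rw [ih x]
      by_cases hin : 0 ≤ x ∧ x ≤ M
      · rw [if_pos hin, if_pos (by omega : 0 ≤ x ∧ x ≤ M + 1)]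
        apply Finset.sum_congr rfl
        intro t ht
        rw [Finset.mem_Icc] at ht
        rw [aL1_step k M hM0]
        have : t ≠ M + 1 := by omega
        simp [this]
      · rw [if_neg hin, if_neg (by omega : ¬ (0 ≤ x ∧ x ≤ M + 1))]

theorem aL2_zero (k d : Int) (f : Int → Int) : aL2 k d d f = fun x => if x = d then 1 else 0 := by
  unfold aL2
  rw [PySem.List.pyRange_one_eq_nil (le_refl (d + 1))]
  rfl

theorem aL2_step (k d : Int) (f : Int → Int) (m : Int) (hm : d ≤ m) :
    aL2 k d (m + 1) f = fun x => if x = m + 1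
      then aL2 k d m f (m + 1) + (∑ j ∈ Finset.Icc 1 (d - 1), aL2 k d m f (m + 1 - j))
           + ∑ j ∈ Finset.Icc d (min (m + 1) k), f (m + 1 - j)
      else aL2 k d m f x := by
  unfold aL2
  rw [show m + 1 + 1 = (m + 1) + 1 from rfl,
      PySem.List.pyRange_one_succ_right (by omega : d + 1 ≤ m + 1),
      List.foldl_append]
  simp only [List.foldl_cons, List.foldl_nil]
  rw [innerFoldSelf (m + 1) _ _ (by
    intro j hj
    rw [PySem.List.mem_pyRange_one] at hj
    omega)]
  rw [innerFoldFix (m + 1) f]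
  funext x
  by_cases hx : x = m + 1
  · simp only [hx, if_true, sum_map_pyRange]
    norm_num
  · simp [hx]

theorem aL2_vanish (k d : Int) (f : Int → Int) (t : ℕ) :
    ∀ x : Int, (x < d ∨ d + (t : Int) < x) → aL2 k d (d + (t : Int)) f x = 0 := by
  induction t with
  | zero =>
    intro x hx
    have hxd : x ≠ d := by omega
    rw [show d + ((0 : ℕ) : Int) = d by simp, aL2_zero]
    simp [hxd]
  | succ t ih =>
    intro x hx
    have hc : d + ((t + 1 : ℕ) : Int) = (d + (t : Int)) + 1 := by push_cast; ring
    rw [hc] at hx ⊢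
    rw [aL2_step k d f (d + (t : Int)) (by omega)]
    have hne : x ≠ d + (t : Int) + 1 := by omega
    simp only [hne, if_false]
    exact ih x (by omega)

theorem bPg_zero (k d : Int) (pf : Int → Int) : bPg k d d pf = fun x => if x = d then 1 else 0 := by
  unfold bPg
  rw [PySem.List.pyRange_one_eq_nil (le_refl (d + 1))]
  rfl

theorem bPg_step (k d : Int) (pf : Int → Int) (m : Int) (hm : d ≤ m) :
    bPg k d (m + 1) pf = fun x =>
      if x = m + 1 then
        bPg k d m pf (m + 1 - 1) +
          (if d ≤ (if k < m + 1 then k else m + 1) then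
              (bPg k d m pf (m + 1 - 1) - bPg k d m pf (m + 1 - d)) +
                (pf (m + 1 - d) -
                  (if 0 ≤ m + 1 - (if k < m + 1 then k else m + 1) - 1
                   then pf (m + 1 - (if k < m + 1 then k else m + 1) - 1) else 0))
            else bPg k d m pf (m + 1 - 1) - bPg k d m pf (m + 1 - d))
      else bPg k d m pf x := by
  unfold bPg
  rw [show m + 1 + 1 = (m + 1) + 1 from rfl,
      PySem.List.pyRange_one_succ_right (by omega : d + 1 ≤ m + 1),
      List.foldl_append]
  rfl

theorem bPg_eq (k d : Int) (N : ℕ) (hd : 1 ≤ d) (t : ℕ) (hN : d + (t : Int) ≤ (N : Int)) : ∀ x : Int,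
    bPg k d (d + (t : Int)) (bPf k (N : Int)) x
      = if d ≤ x ∧ x ≤ d + (t : Int)
        then ∑ s ∈ Finset.Icc d x, aL2 k d (d + (t : Int)) (aL1 k (N : Int)) s else 0 := by
  induction t with
  | zero =>
    intro x
    rw [show d + ((0 : ℕ) : Int) = d by simp, bPg_zero, aL2_zero]
    by_cases hx : x = d
    · subst hx
      simp [Finset.Icc_self]
    · have hc2 : ¬ (d ≤ x ∧ x ≤ d) := by omega
      simp [hx, hc2]
  | succ t ih =>
    intro x
    have hN' : d + (t : Int) ≤ (N : Int) := by push_cast at hN ⊢; omega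
    have hc : d + ((t + 1 : ℕ) : Int) = (d + (t : Int)) + 1 := by push_cast; ring
    rw [hc]
    rw [bPg_step k d (bPf k (N : Int)) (d + (t : Int)) (by omega)]
    set M : Int := d + (t : Int) with hM
    have hdM : d ≤ M := by omega
    have hMN : M + 1 ≤ (N : Int) := by omega
    have ihx := ih hN'
    -- G-side vanish below d and above M
    have hGvan : ∀ s : Int, (s < d ∨ M < s) → aL2 k d M (aL1 k (N : Int)) s = 0 := by
      intro s hs
      exact aL2_vanish k d (aL1 k (N : Int)) t s (by omega)
    by_cases hx : x = M + 1
    · subst hx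
      simp only [eq_self_iff_true, if_true]
      rw [if_pos (by omega : d ≤ M + 1 ∧ M + 1 ≤ M + 1)]
      rw [show M + 1 - 1 = M by ring]
      have hmin : (if k < M + 1 then k else M + 1) = min (M + 1) k := by
        rcases le_or_gt k (M + 1) with h | h
        · simp [min_def]; omega
        · simp [min_def]; omega
      rw [hmin]
      set w : Int := min (M + 1) k with hw
      have hwle : w ≤ M + 1 := by omega
      -- split the top term off the right-hand sum
      have htop : (∑ s ∈ Finset.Icc d (M + 1), aL2 k d (M + 1) (aL1 k (N : Int)) s)
          = (∑ s ∈ Finset.Icc d M, aL2 k d (M + 1) (aL1 k (N : Int)) s)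
            + aL2 k d (M + 1) (aL1 k (N : Int)) (M + 1) := by
        have hps := psum_diff (aL2 k d (M + 1) (aL1 k (N : Int))) d M (M + 1) (by omega) (by omega)
        rw [Finset.Icc_self, Finset.sum_singleton] at hps
        omega
      have hlow : (∑ s ∈ Finset.Icc d M, aL2 k d (M + 1) (aL1 k (N : Int)) s)
          = ∑ s ∈ Finset.Icc d M, aL2 k d M (aL1 k (N : Int)) s := by
        apply Finset.sum_congr rfl
        intro s hs
        rw [Finset.mem_Icc] at hs
        rw [aL2_step k d (aL1 k (N : Int)) M hdM]
        have : s ≠ M + 1 := by omega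
        simp [this]
      have hnew : aL2 k d (M + 1) (aL1 k (N : Int)) (M + 1)
          = (∑ s ∈ Finset.Icc (M + 2 - d) M, aL2 k d M (aL1 k (N : Int)) s)
            + ∑ s ∈ Finset.Icc (M + 1 - w) (M + 1 - d), aL1 k (N : Int) s := by
        rw [aL2_step k d (aL1 k (N : Int)) M hdM]
        simp only [eq_self_iff_true, if_true]
        rw [aL2_vanish k d (aL1 k (N : Int)) t (M + 1) (by omega)]
        rw [sum_reflect (aL2 k d M (aL1 k (N : Int))) (M + 1) 1 (d - 1)]
        rw [sum_reflect (aL1 k (N : Int)) (M + 1) d (min (M + 1) k)]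
        rw [show M + 1 - (d - 1) = M + 2 - d by ring, show M + 1 - 1 = M by ring, ← hw]
        ring
      rw [htop, hlow, hnew]
      -- left-hand pieces via ih and bPf_eq
      have hPM : bPg k d M (bPf k (N : Int)) M
          = ∑ s ∈ Finset.Icc d M, aL2 k d M (aL1 k (N : Int)) s := by
        rw [ihx M, if_pos (by omega : d ≤ M ∧ M ≤ M)]
      have hgi0 : bPg k d M (bPf k (N : Int)) M - bPg k d M (bPf k (N : Int)) (M + 1 - d)
          = ∑ s ∈ Finset.Icc (M + 2 - d) M, aL2 k d M (aL1 k (N : Int)) s := by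
        by_cases hsmall : d ≤ M + 1 - d
        · have h2 : bPg k d M (bPf k (N : Int)) (M + 1 - d)
              = ∑ s ∈ Finset.Icc d (M + 1 - d), aL2 k d M (aL1 k (N : Int)) s := by
            rw [ihx, if_pos (by omega : d ≤ M + 1 - d ∧ M + 1 - d ≤ M)]
          rw [hPM, h2]
          have hps := psum_diff (aL2 k d M (aL1 k (N : Int))) d (M + 1 - d) M (by omega) (by omega)
          rw [show M + 1 - d + 1 = M + 2 - d by ring] at hps
          omega
        · have h2 : bPg k d M (bPf k (N : Int)) (M + 1 - d) = 0 := by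
            rw [ihx, if_neg (by omega : ¬ (d ≤ M + 1 - d ∧ M + 1 - d ≤ M))]
          rw [hPM, h2]
          have hext := sum_ext_low (aL2 k d M (aL1 k (N : Int))) d (M + 2 - d) M
            (by omega) (fun s hs => hGvan s (Or.inl hs))
          omega
      by_cases hwd : d ≤ w
      · rw [if_pos hwd]
        have hpf1 : bPf k (N : Int) (M + 1 - d)
            = ∑ s ∈ Finset.Icc 0 (M + 1 - d), aL1 k (N : Int) s := by
          rw [bPf_eq k N, if_pos (by omega : 0 ≤ M + 1 - d ∧ M + 1 - d ≤ (N : Int))]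
        by_cases hlo : (0 : Int) ≤ M + 1 - w - 1
        · rw [if_pos hlo]
          have hpf2 : bPf k (N : Int) (M + 1 - w - 1)
              = ∑ s ∈ Finset.Icc 0 (M + 1 - w - 1), aL1 k (N : Int) s := by
            rw [bPf_eq k N, if_pos (by omega : 0 ≤ M + 1 - w - 1 ∧ M + 1 - w - 1 ≤ (N : Int))]
          rw [hgi0, hpf1, hpf2, hPM]
          have hps := psum_diff (aL1 k (N : Int)) 0 (M + 1 - w - 1) (M + 1 - d) (by omega) (by omega)
          rw [show M + 1 - w - 1 + 1 = M + 1 - w by ring] at hps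
          omega
        · rw [if_neg hlo]
          have hwM : w = M + 1 := by omega
          rw [hgi0, hpf1, hPM, hwM, show M + 1 - (M + 1) = 0 by ring]
          ring
      · rw [if_neg hwd]
        have hemp : Finset.Icc (M + 1 - w) (M + 1 - d) = ∅ := by
          apply Finset.Icc_eq_empty
          omega
        rw [hgi0, hPM, hemp, Finset.sum_empty]
        ring
    · simp only [hx, if_false]
      rw [ihx x]
      by_cases hin : d ≤ x ∧ x ≤ M
      · rw [if_pos hin, if_pos (by omega : d ≤ x ∧ x ≤ M + 1)]
        apply Finset.sum_congr rfl
        intro s hs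
        rw [Finset.mem_Icc] at hs
        rw [aL2_step k d (aL1 k (N : Int)) M hdM]
        have : s ≠ M + 1 := by omega
        simp [this]
      · rw [if_neg hin, if_neg (by omega : ¬ (d ≤ x ∧ x ≤ M + 1))]

-- bridge: list states vs functional states
theorem foldl_rel {σ τ γ : Type} (R : σ → τ → Prop) (f : σ → γ → σ) (g : τ → γ → τ) :
    ∀ (l : List γ) (a : σ) (b : τ),
      (∀ a' b' c, c ∈ l → R a' b' → R (f a' c) (g b' c)) → R a b →
      R (l.foldl f a) (l.foldl g b) := by
  intro l
  induction l with
  | nil => intro a b _ h; exact h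
  | cons c cs ih =>
    intro a b hstep h
    exact ih _ _ (fun a' b' c' hc' => hstep a' b' c' (by simp [hc']))
      (hstep a b c (by simp) h)

theorem getD_setD (l : List Int) (i x v : Int) (h0i : 0 ≤ i) (hil : i < (l.length : Int))
    (h0x : 0 ≤ x) (hxl : x < (l.length : Int)) :
    PySem.List.pyGetD (PySem.List.pySetD l i v) x 0
      = if x = i then v else PySem.List.pyGetD l x 0 := by
  rw [PySem.List.pySetD_of_nonneg l v h0i,
      PySem.List.pyGetD_eq_getElem (l.set i.toNat v) 0 h0x
        (by simp only [List.length_set]; omega),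
      List.getElem_set]
  rcases eq_or_ne x i with he | hne
  · subst he
    rw [if_pos rfl, if_pos rfl]
  · rw [if_neg hne, if_neg (by omega),
        PySem.List.pyGetD_eq_getElem l 0 h0x hxl]

theorem rep_init (n c : Int) (hn : 0 ≤ n) (hc0 : 0 ≤ c) (hcn : c ≤ n) :
    LRep n (PySem.List.pySetD (List.replicate (n + 1).toNat 0) c 1)
      (fun x => if x = c then 1 else 0) := by
  constructor
  · rw [PySem.List.length_pySetD, List.length_replicate]
  · intro x hx0 hxn
    beta_reduce
    rw [getD_setD _ c x 1 hc0 (by simp only [List.length_replicate]; omega) hx0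
        (by simp only [List.length_replicate]; omega)]
    rcases eq_or_ne x c with he | hne
    · subst he; rw [if_pos rfl, if_pos rfl]
    · rw [if_neg hne, if_neg hne,
          PySem.List.pyGetD_eq_getElem (List.replicate (n + 1).toNat (0 : Int)) 0 hx0
            (by simp only [List.length_replicate]; omega),
          List.getElem_replicate]

theorem rep_aL1 (n k : Int) (hn : 0 ≤ n) : LRep n (aL1List n k) (aL1 k n) := by
  unfold aL1List aL1
  refine foldl_rel (LRep n) _ _ _ _ _ ?_ (rep_init n 0 hn (le_refl 0) hn)
  intro l F i hi hRep
  rw [PySem.List.mem_pyRange_one] at hi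
  refine foldl_rel (LRep n) _ _ _ _ _ ?_ hRep
  intro l' G j hj hRep'
  rw [PySem.List.mem_pyRange_one] at hj
  have hik : min i k ≤ i := min_le_left i k
  obtain ⟨hlen, hval⟩ := hRep'
  constructor
  · rw [PySem.List.length_pySetD]; exact hlen
  · intro x hx0 hxn
    beta_reduce
    rw [getD_setD l' i x _ (by omega) (by rw [hlen]; omega) hx0 (by rw [hlen]; omega)]
    rcases eq_or_ne x i with he | hne
    · subst he
      rw [if_pos rfl, if_pos rfl, hval x (by omega) (by omega),
          hval (x - j) (by omega) (by omega)]
    · rw [if_neg hne, if_neg hne, hval x hx0 hxn]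

theorem rep_aL2 (n k d : Int) (l1 : List Int) (f : Int → Int)
    (hn : 0 ≤ n) (hd : 1 ≤ d) (hdn : d ≤ n) (hl1 : LRep n l1 f) :
    LRep n (aL2List n k d l1) (aL2 k d n f) := by
  unfold aL2List aL2
  refine foldl_rel (LRep n) _ _ _ _ _ ?_ (rep_init n d hn (by omega) hdn)
  intro l F i hi hRep
  rw [PySem.List.mem_pyRange_one] at hi
  have hik : min i k ≤ i := min_le_left i k
  have hmid : LRep n
      ((PySem.List.pyRange 1 d 1).foldl
        (fun l2 j =>
          PySem.List.pySetD l2 i (PySem.List.pyGetD l2 i 0 + PySem.List.pyGetD l2 (i - j) 0)) l)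
      ((PySem.List.pyRange 1 d 1).foldl
        (fun G j => fun x => if x = i then G i + G (i - j) else G x) F) := by
    refine foldl_rel (LRep n) _ _ _ _ _ ?_ hRep
    intro l' G j hj hRep'
    rw [PySem.List.mem_pyRange_one] at hj
    obtain ⟨hlen, hval⟩ := hRep'
    constructor
    · rw [PySem.List.length_pySetD]; exact hlen
    · intro x hx0 hxn
      beta_reduce
      rw [getD_setD l' i x _ (by omega) (by rw [hlen]; omega) hx0 (by rw [hlen]; omega)]
      rcases eq_or_ne x i with he | hne
      · subst he
        rw [if_pos rfl, if_pos rfl, hval x (by omega) (by omega),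
            hval (x - j) (by omega) (by omega)]
      · rw [if_neg hne, if_neg hne, hval x hx0 hxn]
  refine foldl_rel (LRep n) _ _ _ _ _ ?_ hmid
  intro l' G j hj hRep'
  rw [PySem.List.mem_pyRange_one] at hj
  obtain ⟨hlen, hval⟩ := hRep'
  constructor
  · rw [PySem.List.length_pySetD]; exact hlen
  · intro x hx0 hxn
    beta_reduce
    rw [getD_setD l' i x _ (by omega) (by rw [hlen]; omega) hx0 (by rw [hlen]; omega)]
    rcases eq_or_ne x i with he | hne
    · subst he
      rw [if_pos rfl, if_pos rfl, hval x (by omega) (by omega),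
          hl1.2 (x - j) (by omega) (by omega)]
    · rw [if_neg hne, if_neg hne, hval x hx0 hxn]

theorem rep_bPf (n k : Int) (hn : 0 ≤ n) : LRep n (bPfList n k) (bPf k n) := by
  unfold bPfList bPf
  refine foldl_rel (LRep n) _ _ _ _ _ ?_ (rep_init n 0 hn (le_refl 0) hn)
  intro l P i hi hRep
  rw [PySem.List.mem_pyRange_one] at hi
  obtain ⟨hlen, hval⟩ := hRep
  have hm0 : (0 : Int) ≤ (if (if k < i then k else i) < 0 then 0 else if k < i then k else i) := by
    split_ifs <;> omega
  have hmle : (if (if k < i then k else i) < 0 then 0 else if k < i then k else i) ≤ i := by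
    split_ifs <;> omega
  set m : Int := if (if k < i then k else i) < 0 then 0 else if k < i then k else i with hm
  constructor
  · rw [PySem.List.length_pySetD]; exact hlen
  · intro x hx0 hxn
    rw [getD_setD l i x _ (by omega) (by rw [hlen]; omega) hx0 (by rw [hlen]; omega)]
    show (if x = i
        then PySem.List.pyGetD l (i - 1) 0 +
          (PySem.List.pyGetD l (i - 1) 0 -
            if 0 ≤ i - m - 1 then PySem.List.pyGetD l (i - m - 1) 0 else 0)
        else PySem.List.pyGetD l x 0)
      = if x = i then P (i - 1) + (P (i - 1) - if 0 ≤ i - m - 1 then P (i - m - 1) else 0)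
        else P x
    rcases eq_or_ne x i with he | hne
    · rw [if_pos he, if_pos he, hval (i - 1) (by omega) (by omega)]
      by_cases hlo : (0 : Int) ≤ i - m - 1
      · rw [if_pos hlo, if_pos hlo, hval (i - m - 1) (by omega) (by omega)]
      · rw [if_neg hlo, if_neg hlo]
    · rw [if_neg hne, if_neg hne, hval x hx0 hxn]

theorem rep_bPg (n k d : Int) (pfl : List Int) (pff : Int → Int)
    (hn : 0 ≤ n) (hd : 1 ≤ d) (hdn : d ≤ n) (hpf : LRep n pfl pff) :
    LRep n (bPgList n k d pfl) (bPg k d n pff) := by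
  unfold bPgList bPg
  refine foldl_rel (LRep n) _ _ _ _ _ ?_ (rep_init n d hn (by omega) hdn)
  intro l P i hi hRep
  rw [PySem.List.mem_pyRange_one] at hi
  obtain ⟨hlen, hval⟩ := hRep
  have hmi : (if k < i then k else i) ≤ i := by split_ifs <;> omega
  set m : Int := if k < i then k else i with hm
  constructor
  · rw [PySem.List.length_pySetD]; exact hlen
  · intro x hx0 hxn
    rw [getD_setD l i x _ (by omega) (by rw [hlen]; omega) hx0 (by rw [hlen]; omega)]
    show (if x = i
        then PySem.List.pyGetD l (i - 1) 0 +
          (if d ≤ m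
            then (PySem.List.pyGetD l (i - 1) 0 - PySem.List.pyGetD l (i - d) 0) +
              (PySem.List.pyGetD pfl (i - d) 0 -
                (if 0 ≤ i - m - 1 then PySem.List.pyGetD pfl (i - m - 1) 0 else 0))
            else PySem.List.pyGetD l (i - 1) 0 - PySem.List.pyGetD l (i - d) 0)
        else PySem.List.pyGetD l x 0)
      = if x = i
        then P (i - 1) +
          (if d ≤ m
            then (P (i - 1) - P (i - d)) +
              (pff (i - d) - (if 0 ≤ i - m - 1 then pff (i - m - 1) else 0))
            else P (i - 1) - P (i - d))
        else P x
    rcases eq_or_ne x i with he | hne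
    · rw [if_pos he, if_pos he, hval (i - 1) (by omega) (by omega),
          hval (i - d) (by omega) (by omega)]
      by_cases hdm : d ≤ m
      · rw [if_pos hdm, if_pos hdm, hpf.2 (i - d) (by omega) (by omega)]
        by_cases hlo : (0 : Int) ≤ i - m - 1
        · rw [if_pos hlo, if_pos hlo, hpf.2 (i - m - 1) (by omega) (by omega)]
        · rw [if_neg hlo, if_neg hlo]
      · rw [if_neg hdm, if_neg hdm]
    · rw [if_neg hne, if_neg hne, hval x hx0 hxn]

-- ===== VERDICT (by name: the statement is the Claim_ definition above) =====
theorem solve_spec : Claim_equal_solve := by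
  intro n k d hdom hpre
  obtain ⟨hn, hd⟩ := hpre
  unfold Spec_solve solve solve_alt
  by_cases hdn : d > n
  · simp [hdn]
  · have hdle : d ≤ n := by omega
    have hn1 : (1 : Int) ≤ n := by omega
    simp only [if_neg hdn, if_pos hn1]
    have h1 := rep_aL1 n k hn
    have h2 := rep_aL2 n k d (aL1List n k) (aL1 k n) hn hd hdle h1
    have h4 := rep_bPg n k d (bPfList n k) (bPf k n) hn hd hdle (rep_bPf n k hn)
    have hlast : PySem.List.pyGetD (aL2List n k d (aL1List n k)) (-1) 0
        = aL2 k d n (aL1 k n) n := by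
      obtain ⟨hlen, hval⟩ := h2
      rw [show (-1 : Int) = -((1 : ℕ) : Int) from by norm_num]
      rw [PySem.List.pyGetD_neg_natCast _ 1 0 (by omega) (by rw [hlen]; omega)]
      have hx := hval n (by omega) (le_refl n)
      rw [PySem.List.pyGetD_eq_getElem (aL2List n k d (aL1List n k)) 0 (by omega)
        (by rw [hlen]; omega)] at hx
      rw [← hx]
      congr 1
      rw [hlen]; omega
    have hpgn : PySem.List.pyGetD (bPgList n k d (bPfList n k)) n 0
        = bPg k d n (bPf k n) n := h4.2 n (by omega) (le_refl n)
    have hpgn1 : PySem.List.pyGetD (bPgList n k d (bPfList n k)) (n - 1) 0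
        = bPg k d n (bPf k n) (n - 1) := h4.2 (n - 1) (by omega) (by omega)
    rw [hlast, hpgn, hpgn1]
    congr 1
    set N : ℕ := n.toNat with hNdef
    set t : ℕ := (n - d).toNat with htdef
    have hNn : ((N : ℕ) : Int) = n := Int.toNat_of_nonneg hn
    have htd : d + (t : Int) = n := by omega
    have hpg := bPg_eq k d N hd t (by omega)
    have e1 : bPg k d n (bPf k n) = bPg k d (d + (t : Int)) (bPf k ((N : ℕ) : Int)) := by
      rw [htd, hNn]
    have e2 : aL2 k d n (aL1 k n) = aL2 k d (d + (t : Int)) (aL1 k ((N : ℕ) : Int)) := by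
      rw [htd, hNn]
    rw [e1, e2]
    rw [hpg n, hpg (n - 1)]
    rw [if_pos (by omega : d ≤ n ∧ n ≤ d + (t : Int))]
    by_cases hdn1 : d ≤ n - 1
    · rw [if_pos (by omega : d ≤ n - 1 ∧ n - 1 ≤ d + (t : Int))]
      have hps := psum_diff (aL2 k d (d + (t : Int)) (aL1 k ((N : ℕ) : Int))) d (n - 1) n
        (by omega) (by omega)
      rw [show n - 1 + 1 = n by ring, Finset.Icc_self, Finset.sum_singleton] at hps
      linarith [hps]
    · have hdn' : d = n := by omega
      rw [if_neg (by omega : ¬ (d ≤ n - 1 ∧ n - 1 ≤ d + (t : Int)))]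
      rw [sub_zero, hdn', Finset.Icc_self, Finset.sum_singleton]
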